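-- pv_equiv track=rewrite | github.com/Jeseoyun/CoyoTe | boj/S2/week7/7490/nimoot.py | calculate
-- ===== SOURCE A (Python) =====
-- def calculate(sik):
--     total = 0
--     num = 0
--     sign = 1
--
--     for su in sik:
--         if su == ' ':
--             continue
--         elif su.isdigit():
--             num = num * 10 + int(su)
--         else:
--             total += sign * num
--             num = 0
--             if su == '+':
--                 sign = 1
--             else:
--                 sign = -1
--
--     total += sign * num
--     return total
-- ===== SOURCE B (Python) =====
-- def calculate(sik):
--     s = ''.join(c for c in sik if c != ' ')
--     total, sign = 0, 1
--     i, n = 0, len(s)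
--     while i < n:
--         if s[i].isdigit():
--             j = i
--             while j < n and s[j].isdigit():
--                 j += 1
--             total += sign * int(s[i:j])
--             i = j
--         else:
--             sign = 1 if s[i] == '+' else -1
--             i += 1
--     return total
-- ===== Notes on version B (the rewrite author's own statement) =====
-- stated objective: alternative
-- what changed: Replaces A's fused char-by-char scan with a (total,num,sign) accumulator by a tokenize-then-evaluate pass: strip spaces first, then scan whole digit runs (parsing each number with int on a slice) and operator characters, with no partial-number state.
import Mathlib
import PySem

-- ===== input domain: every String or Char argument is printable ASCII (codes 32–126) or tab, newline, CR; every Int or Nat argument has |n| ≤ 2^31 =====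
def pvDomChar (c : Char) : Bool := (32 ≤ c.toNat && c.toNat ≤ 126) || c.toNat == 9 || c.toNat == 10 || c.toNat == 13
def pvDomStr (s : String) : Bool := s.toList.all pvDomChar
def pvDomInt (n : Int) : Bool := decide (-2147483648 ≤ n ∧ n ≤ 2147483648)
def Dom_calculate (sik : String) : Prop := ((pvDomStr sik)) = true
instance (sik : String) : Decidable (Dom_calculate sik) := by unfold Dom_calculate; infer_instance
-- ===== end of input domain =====

-- B is a tokenize-then-evaluate rewrite (strip spaces, then scan whole digit runs and
-- operator chars) of A's fused char-by-char accumulator; same O(n) cost ("alternative").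

-- ===== PORT A =====
-- int(su) on a single digit character (the branch guarantees isdigit su), exact there
def digitVal (c : Char) : Int := (c.toNat : Int) - 48

-- the for-loop of A with state (total, num, sign); [] performs the final 'total += sign * num'
def calcAGo : List Char → Int → Int → Int → Int
  | [], total, num, sign => total + sign * num
  | c :: rest, total, num, sign =>
    if c = ' ' then calcAGo rest total num sign
    else if PySem.Chars.isdigit c then calcAGo rest total (num * 10 + digitVal c) sign
    else calcAGo rest (total + sign * num) 0 (if c = '+' then 1 else -1)

def calculate (sik : String) : Int := calcAGo sik.toList 0 0 1

-- ===== PORT B =====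
-- int(s[i:j]) where s[i:j] is a nonempty run of ASCII digits; exact on that domain
def intOfDigits (cs : List Char) : Int := cs.foldl (fun a c => a * 10 + digitVal c) 0

-- the while-loop of B: consume a whole digit run (takeWhile/dropWhile = the inner j-loop
-- and the slice s[i:j]), or a single operator character
def calcBGo : List Char → Int → Int → Int
  | [], total, _ => total
  | c :: rest, total, sign =>
    if hd : PySem.Chars.isdigit c then
      calcBGo ((c :: rest).dropWhile PySem.Chars.isdigit)
        (total + sign * intOfDigits ((c :: rest).takeWhile PySem.Chars.isdigit)) sign
    else
      calcBGo rest total (if c = '+' then 1 else -1)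
  termination_by cs => cs.length
  decreasing_by
  · simp only [List.dropWhile_cons, hd, if_true]
    exact Nat.lt_succ_of_le (List.length_dropWhile_le _ _)
  · simp

-- ''.join(c for c in sik if c != ' ')
def calculate_alt (sik : String) : Int :=
  calcBGo (sik.toList.filter (fun c => c != ' ')) 0 1

-- ===== PRECONDITION & SPEC =====
def Spec_calculate (sik : String) (out : Int) : Prop := out = calculate_alt sik
instance (sik : String) (out : Int) : Decidable (Spec_calculate sik out) := by unfold Spec_calculate; infer_instance

-- ===== CLAIM (what is proved, stated in full; the proofs are below) =====
def Claim_equal_calculate : Prop := ∀ (sik : String), Dom_calculate sik → Spec_calculate sik (calculate sik)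

-- ===== LEMMAS AND PROOFS =====

-- skipping spaces in A is the same as filtering them out first
lemma calcA_filter (cs : List Char) : ∀ total num sign,
    calcAGo cs total num sign = calcAGo (cs.filter (fun c => c != ' ')) total num sign := by
  induction cs with
  | nil => intro total num sign; rfl
  | cons c rest ih =>
    intro total num sign
    by_cases h : c = ' '
    · subst h
      simp [calcAGo, ih]
    · simp only [List.filter_cons, bne_iff_ne]
      rw [if_pos (by simpa using h)]
      by_cases hd : PySem.Chars.isdigit c <;> simp [calcAGo, h, hd, ih]

lemma isdigit_ne_space {c : Char} (h : PySem.Chars.isdigit c = true) : c ≠ ' ' := by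
  intro hc; subst hc; simp [PySem.Chars.isdigit] at h

-- A consumes a run of digits by accumulating into num
lemma calcA_run (run : List Char) : ∀ rest total num sign,
    (∀ c ∈ run, PySem.Chars.isdigit c = true) →
    calcAGo (run ++ rest) total num sign =
      calcAGo rest total (run.foldl (fun a c => a * 10 + digitVal c) num) sign := by
  induction run with
  | nil => intro rest total num sign _; rfl
  | cons c rs ih =>
    intro rest total num sign hall
    have hc : PySem.Chars.isdigit c = true := hall c (by simp)
    have hne : c ≠ ' ' := isdigit_ne_space hc
    simp only [List.cons_append, calcAGo, hne, ite_false, hc, ite_true]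
    exact ih rest total (num * 10 + digitVal c) sign (fun x hx => hall x (by simp [hx]))

-- main invariant: on a space-free list, A with num = 0 computes B
lemma calcA_eq_calcB (n : Nat) : ∀ (cs : List Char), cs.length ≤ n → (' ' ∉ cs) →
    ∀ total sign, calcAGo cs total 0 sign = calcBGo cs total sign := by
  induction n with
  | zero =>
    intro cs hlen _ total sign
    have : cs = [] := List.eq_nil_of_length_eq_zero (Nat.le_zero.mp hlen)
    subst this
    simp [calcAGo, calcBGo]
  | succ n ih =>
    intro cs hlen hsp total sign
    match cs with
    | [] => simp [calcAGo, calcBGo]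
    | c :: rest =>
      by_cases hd : PySem.Chars.isdigit c = true
      · -- digit run
        set run := (c :: rest).takeWhile PySem.Chars.isdigit with hrun
        set rest' := (c :: rest).dropWhile PySem.Chars.isdigit with hrest'
        have hsplit : run ++ rest' = c :: rest := List.takeWhile_append_dropWhile
        have hall : ∀ x ∈ run, PySem.Chars.isdigit x = true := by
          intro x hx; exact List.mem_takeWhile_imp hx
        have hA : calcAGo (c :: rest) total 0 sign =
            calcAGo rest' total (intOfDigits run) sign := by
          rw [← hsplit]; exact calcA_run run rest' total 0 sign hall
        have hB : calcBGo (c :: rest) total sign =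
            calcBGo rest' (total + sign * intOfDigits run) sign := by
          rw [calcBGo]; simp [hd, hrun, hrest']
        rw [hA, hB]
        have hspr : ' ' ∉ rest' := by
          intro hm
          exact hsp (by rw [← hsplit]; exact List.mem_append_right _ hm)
        match hre : rest' with
        | [] => simp [calcAGo, calcBGo]
        | d :: rest2 =>
          have hdnd : PySem.Chars.isdigit d = false := by
            have h0 := List.head?_dropWhile_not PySem.Chars.isdigit (c :: rest)
            rw [← hrest'] at h0
            simpa using h0
          have hdne : d ≠ ' ' := by
            intro h; exact hspr (by simp [h])
          have hlen2 : rest2.length ≤ n := by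
            have h1 : (d :: rest2).length ≤ rest.length := by
              rw [hrest']
              simp only [List.dropWhile_cons, hd, if_true]
              exact List.length_dropWhile_le _ _
            simp only [List.length_cons] at h1 hlen
            omega
          have hspr2 : ' ' ∉ rest2 := by
            intro hm; exact hspr (by simp [hm])
          simp only [calcAGo, hdne, ite_false, hdnd, Bool.false_eq_true]
          rw [calcBGo]
          simp only [hdnd, Bool.false_eq_true]
          exact ih rest2 hlen2 hspr2 (total + sign * intOfDigits run) _
      · -- operator character
        have hne : c ≠ ' ' := fun h => hsp (by simp [h])
        have hrl : rest.length ≤ n := by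
          simp only [List.length_cons] at hlen; omega
        have hspr : ' ' ∉ rest := fun hm => hsp (by simp [hm])
        simp only [calcAGo, hne, ite_false, hd]
        rw [calcBGo]
        simp only [hd]
        simp only [mul_zero, add_zero]
        exact ih rest hrl hspr total _

theorem calculate_spec_aux (sik : String) : calculate sik = calculate_alt sik := by
  unfold calculate calculate_alt
  rw [calcA_filter]
  apply calcA_eq_calcB (sik.toList.filter (fun c => c != ' ')).length _ (le_refl _)
  intro hm
  have := List.of_mem_filter hm
  simp at this

-- ===== VERDICT (by name: the statement is the Claim_ definition above) =====
theorem calculate_spec : Claim_equal_calculate := by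
  intro sik _
  unfold Spec_calculate
  exact calculate_spec_aux sik
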